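-- pv_equiv track=rewrite | github.com/flutter/flutter | sky/tools/webkitpy/layout_tests/port/builders.py | builder_name_for_port_name
-- ===== SOURCE A (Python) =====
-- _exact_matches = {
--     "WebKit XP": {"port_name": "win-xp", "specifiers": ['XP', 'Release']},
--     "WebKit Win7": {"port_name": "win-win7", "specifiers": ['Win7', 'Release']},
--     "WebKit Win7 (dbg)": {"port_name": "win-win7", "specifiers": ['Win7', 'Debug']},
--     "WebKit Linux": {"port_name": "linux-x86_64", "specifiers": ['Linux', 'Release']},
--     "WebKit Linux 32": {"port_name": "linux-x86", "specifiers": ['Linux', 'Release']},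
--     "WebKit Linux (dbg)": {"port_name": "linux-x86_64", "specifiers": ['Linux', 'Debug']},
--     "WebKit Mac10.6": {"port_name": "mac-snowleopard", "specifiers": ['SnowLeopard', 'Release']},
--     "WebKit Mac10.6 (dbg)": {"port_name": "mac-snowleopard", "specifiers": ['SnowLeopard', 'Debug']},
--     "WebKit Mac10.7": {"port_name": "mac-lion", "specifiers": ['Lion', 'Release']},
--     "WebKit Mac10.7 (dbg)": {"port_name": "mac-lion", "specifiers": ['Lion', 'Debug']},
--     "WebKit Mac10.8": {"port_name": "mac-mountainlion", "specifiers": ['MountainLion', 'Release']},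
--     "WebKit Mac10.8 (retina)": {"port_name": "mac-retina", "specifiers": ['Retina', 'Release']},
--     "WebKit Mac10.9": {"port_name": "mac-mavericks", "specifiers": ['Mavericks', 'Release']},
--     "WebKit Android (Nexus4)": {"port_name": "android", "specifiers": ['Android', 'Release']},
-- }
--
-- def builder_name_for_port_name(target_port_name):
--     debug_builder_name = None
--     for builder_name, builder_info in _exact_matches.items():
--         if builder_info['port_name'] == target_port_name:
--             if 'dbg' in builder_name:
--                 debug_builder_name = builder_name
--             else:
--                 return builder_name
--     return debug_builder_name
-- ===== SOURCE B (Python) =====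
-- # Precomputed literal reverse index: port_name -> builder name.  Every port that has a
-- # (dbg) builder in the original table also has a release builder, which the original
-- # search prefers, so a single flat dict captures the whole function.
-- _builder_by_port = {
--     "win-xp": "WebKit XP",
--     "win-win7": "WebKit Win7",
--     "linux-x86_64": "WebKit Linux",
--     "linux-x86": "WebKit Linux 32",
--     "mac-snowleopard": "WebKit Mac10.6",
--     "mac-lion": "WebKit Mac10.7",
--     "mac-mountainlion": "WebKit Mac10.8",
--     "mac-retina": "WebKit Mac10.8 (retina)",
--     "mac-mavericks": "WebKit Mac10.9",
--     "android": "WebKit Android (Nexus4)",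
-- }
--
-- def builder_name_for_port_name(target_port_name):
--     return _builder_by_port.get(target_port_name)
-- ===== Notes on version B (the rewrite author's own statement) =====
-- stated objective: simpler
-- what changed: Replaced the per-call scan with a remembered dbg fallback by a precomputed literal reverse index (port_name -> builder); since every port having a dbg builder also has a release builder, which A prefers, the body is a single dict .get.
import Mathlib
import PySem

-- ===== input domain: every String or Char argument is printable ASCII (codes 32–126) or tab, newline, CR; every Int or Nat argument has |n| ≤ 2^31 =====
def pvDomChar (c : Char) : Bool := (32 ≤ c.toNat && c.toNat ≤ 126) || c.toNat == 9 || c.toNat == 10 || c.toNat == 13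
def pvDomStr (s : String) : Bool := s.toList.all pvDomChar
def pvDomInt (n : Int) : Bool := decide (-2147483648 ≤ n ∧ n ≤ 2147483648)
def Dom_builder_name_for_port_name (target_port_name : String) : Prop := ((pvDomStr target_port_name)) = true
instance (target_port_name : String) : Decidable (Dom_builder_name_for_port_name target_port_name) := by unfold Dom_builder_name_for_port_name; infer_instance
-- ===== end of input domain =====

-- B replaces A's per-call scan-with-debug-fallback by a precomputed literal reverse index
-- (port_name -> builder name); the body is a single dict lookup.
-- ===== PORT A =====
structure BuilderInfo where
  port_name : String
  specifiers : List String
deriving DecidableEq, Repr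

def exactMatches : List (String × BuilderInfo) :=
  [ ("WebKit XP", ⟨"win-xp", ["XP", "Release"]⟩),
    ("WebKit Win7", ⟨"win-win7", ["Win7", "Release"]⟩),
    ("WebKit Win7 (dbg)", ⟨"win-win7", ["Win7", "Debug"]⟩),
    ("WebKit Linux", ⟨"linux-x86_64", ["Linux", "Release"]⟩),
    ("WebKit Linux 32", ⟨"linux-x86", ["Linux", "Release"]⟩),
    ("WebKit Linux (dbg)", ⟨"linux-x86_64", ["Linux", "Debug"]⟩),
    ("WebKit Mac10.6", ⟨"mac-snowleopard", ["SnowLeopard", "Release"]⟩),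
    ("WebKit Mac10.6 (dbg)", ⟨"mac-snowleopard", ["SnowLeopard", "Debug"]⟩),
    ("WebKit Mac10.7", ⟨"mac-lion", ["Lion", "Release"]⟩),
    ("WebKit Mac10.7 (dbg)", ⟨"mac-lion", ["Lion", "Debug"]⟩),
    ("WebKit Mac10.8", ⟨"mac-mountainlion", ["MountainLion", "Release"]⟩),
    ("WebKit Mac10.8 (retina)", ⟨"mac-retina", ["Retina", "Release"]⟩),
    ("WebKit Mac10.9", ⟨"mac-mavericks", ["Mavericks", "Release"]⟩),
    ("WebKit Android (Nexus4)", ⟨"android", ["Android", "Release"]⟩) ]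

-- A's loop: scan the table; a non-dbg match returns at once, a dbg match is remembered.
def aLoop (t : String) : List (String × BuilderInfo) → Option String → Option String
  | [], dbg => dbg
  | (bn, info) :: rest, dbg =>
    if info.port_name == t then
      if PySem.Str.isIn "dbg" bn then aLoop t rest (some bn) else some bn
    else aLoop t rest dbg

def builder_name_for_port_name (target_port_name : String) : Option String :=
  aLoop target_port_name exactMatches none

-- ===== PORT B =====
-- The literal reverse index from Source B (port_name -> builder name); no scan, no fallback.
def builderByPort : PySem.Dict String String :=
  PySem.Dict.mk
    [ ("win-xp", "WebKit XP"),
      ("win-win7", "WebKit Win7"),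
      ("linux-x86_64", "WebKit Linux"),
      ("linux-x86", "WebKit Linux 32"),
      ("mac-snowleopard", "WebKit Mac10.6"),
      ("mac-lion", "WebKit Mac10.7"),
      ("mac-mountainlion", "WebKit Mac10.8"),
      ("mac-retina", "WebKit Mac10.8 (retina)"),
      ("mac-mavericks", "WebKit Mac10.9"),
      ("android", "WebKit Android (Nexus4)") ]

def builder_name_for_port_name_alt (target_port_name : String) : Option String :=
  builderByPort.get? target_port_name

-- ===== PRECONDITION & SPEC =====
def Spec_builder_name_for_port_name (target_port_name : String) (out : Option String) : Prop := out = builder_name_for_port_name_alt target_port_name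
instance (target_port_name : String) (out : Option String) : Decidable (Spec_builder_name_for_port_name target_port_name out) := by unfold Spec_builder_name_for_port_name; infer_instance

-- ===== CLAIM =====
def Claim_equal_builder_name_for_port_name : Prop := ∀ (target_port_name : String), Dom_builder_name_for_port_name target_port_name → Spec_builder_name_for_port_name target_port_name (builder_name_for_port_name target_port_name)

-- ===== LEMMAS AND PROOFS =====
-- ===== VERDICT =====
theorem builder_name_for_port_name_spec : Claim_equal_builder_name_for_port_name := by
  intro t _
  unfold Spec_builder_name_for_port_name builder_name_for_port_name builder_name_for_port_name_alt
  by_cases h1 : t = "win-xp"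
  · subst h1; decide
  by_cases h2 : t = "win-win7"
  · subst h2; decide
  by_cases h3 : t = "linux-x86_64"
  · subst h3; decide
  by_cases h4 : t = "linux-x86"
  · subst h4; decide
  by_cases h5 : t = "mac-snowleopard"
  · subst h5; decide
  by_cases h6 : t = "mac-lion"
  · subst h6; decide
  by_cases h7 : t = "mac-mountainlion"
  · subst h7; decide
  by_cases h8 : t = "mac-retina"
  · subst h8; decide
  by_cases h9 : t = "mac-mavericks"
  · subst h9; decide
  by_cases h10 : t = "android"
  · subst h10; decide
  simp only [exactMatches, aLoop, builderByPort, PySem.Dict.get?, beq_iff_eq]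
  simp [Ne.symm h1, Ne.symm h2, Ne.symm h3, Ne.symm h4, Ne.symm h5,
    Ne.symm h6, Ne.symm h7, Ne.symm h8, Ne.symm h9, Ne.symm h10]
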